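-- pv_equiv track=rewrite | github.com/ray-hao/Random | LeetcodeDaily/2024-07-28.py | numTeams
-- ===== SOURCE A (Python) =====
-- from typing import List
--
-- def numTeams(rating: List[int]) -> int:
--
--     idp = [0] * len(rating)
--     iTeams = 0
--
--     ddp = [0] * len(rating)
--     dTeams = 0
--
--     for i in range(len(rating)):
--         for j in range(i):
--             if rating[i] > rating[j]:
--                 idp[i] += 1
--                 iTeams += idp[j]
--             if rating[i] < rating[j]:
--                 ddp[i] += 1
--                 dTeams += ddp[j]
--
--     return iTeams + dTeams
-- ===== SOURCE B (Python) =====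
-- from typing import List
--
-- def numTeams(rating: List[int]) -> int:
--     # middle-pivot: each valid triple is counted once at its middle element
--     n = len(rating)
--     total = 0
--     for j in range(n):
--         v = rating[j]
--         lt_left = sum(1 for x in rating[:j] if x < v)
--         gt_left = sum(1 for x in rating[:j] if x > v)
--         lt_right = sum(1 for x in rating[j+1:] if x < v)
--         gt_right = sum(1 for x in rating[j+1:] if x > v)
--         total += lt_left * gt_right + gt_left * lt_right
--     return total
-- ===== Notes on version B (the rewrite author's own statement) =====
-- stated objective: alternative
-- what changed: Replaces A's dynamic-programming accumulation over pairs (idp/ddp arrays updated in nested loops) by a middle-pivot count: for each index j it counts smaller/greater elements to its left and right and adds lt_left*gt_right + gt_left*lt_right, counting each triple once at its middle element.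
import Mathlib
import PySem

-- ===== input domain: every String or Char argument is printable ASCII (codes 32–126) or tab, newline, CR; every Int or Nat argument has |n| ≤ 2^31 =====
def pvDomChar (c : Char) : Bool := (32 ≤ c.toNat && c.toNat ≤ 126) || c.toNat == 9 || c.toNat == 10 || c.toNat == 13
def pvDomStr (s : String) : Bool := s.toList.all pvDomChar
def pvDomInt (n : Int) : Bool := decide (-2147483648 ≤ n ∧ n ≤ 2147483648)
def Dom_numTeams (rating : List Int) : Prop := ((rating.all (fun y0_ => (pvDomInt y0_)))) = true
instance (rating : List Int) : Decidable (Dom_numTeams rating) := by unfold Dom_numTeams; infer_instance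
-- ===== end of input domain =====

-- B replaces A's O(n^2) dynamic-programming accumulation by a middle-pivot count
-- (each triple counted once at its middle element); objective: alternative.

-- ===== PORT A =====
-- one inner-loop body of A (indices are always in range, so getD is exact)
def pvStepA (rating : List Int) (i : Nat) (st : List Int × Int × List Int × Int) (j : Nat) :
    List Int × Int × List Int × Int :=
  let idp := st.1; let iT := st.2.1; let ddp := st.2.2.1; let dT := st.2.2.2
  let s1 :=
    if rating.getD j 0 < rating.getD i 0 then
      (idp.set i (idp.getD i 0 + 1), iT + idp.getD j 0)
    else (idp, iT)
  let s2 :=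
    if rating.getD i 0 < rating.getD j 0 then
      (ddp.set i (ddp.getD i 0 + 1), dT + ddp.getD j 0)
    else (ddp, dT)
  (s1.1, s1.2, s2.1, s2.2)

def numTeams (rating : List Int) : Int :=
  let n := rating.length
  let st := (List.range n).foldl
    (fun st i => (List.range i).foldl (pvStepA rating i) st)
    (List.replicate n 0, 0, List.replicate n 0, 0)
  st.2.1 + st.2.2.2

-- ===== PORT B =====
def pvCountLt (xs : List Int) (v : Int) : Int := ((xs.filter (fun x => x < v)).length : Int)
def pvCountGt (xs : List Int) (v : Int) : Int := ((xs.filter (fun x => v < x)).length : Int)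

def numTeams_alt (rating : List Int) : Int :=
  (List.range rating.length).foldl
    (fun tot j =>
      let v := rating.getD j 0
      let left := rating.take j
      let right := rating.drop (j + 1)
      tot + pvCountLt left v * pvCountGt right v + pvCountGt left v * pvCountLt right v)
    0

-- ===== PRECONDITION & SPEC =====
def Spec_numTeams (rating : List Int) (out : Int) : Prop := out = numTeams_alt rating
instance (rating : List Int) (out : Int) : Decidable (Spec_numTeams rating out) := by unfold Spec_numTeams; infer_instance

-- ===== CLAIM (what is proved, stated in full; the proofs are below) =====
def Claim_equal_numTeams : Prop := ∀ (rating : List Int), Dom_numTeams rating → Spec_numTeams rating (numTeams rating)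


-- ===== LEMMAS AND PROOFS =====

-- value at index i (0 outside range; the ports only read in-range indices)
def pvRv (r : List Int) (i : Nat) : Int := r.getD i 0

-- #smaller strictly left of j
def pvCL (r : List Int) (j : Nat) : Int :=
  ∑ t ∈ Finset.range j, if pvRv r t < pvRv r j then 1 else 0
-- #greater strictly left of j
def pvCG (r : List Int) (j : Nat) : Int :=
  ∑ t ∈ Finset.range j, if pvRv r j < pvRv r t then 1 else 0
-- #greater strictly right of j (indices below n)
def pvGR (r : List Int) (n j : Nat) : Int :=
  ∑ i ∈ Finset.Ico (j + 1) n, if pvRv r j < pvRv r i then 1 else 0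
-- #smaller strictly right of j
def pvLR (r : List Int) (n j : Nat) : Int :=
  ∑ i ∈ Finset.Ico (j + 1) n, if pvRv r i < pvRv r j then 1 else 0

-- the dp arrays of A after the first m outer iterations
def pvArr (r : List Int) (f : List Int → Nat → Int) (n m : Nat) : List Int :=
  (List.range n).map (fun j => if j < m then f r j else 0)

theorem pv_getD_set (l : List Int) (i j : Nat) (a : Int) :
    (l.set i a).getD j 0 = if i = j ∧ i < l.length then a else l.getD j 0 := by
  simp only [List.getD_eq_getElem?_getD, List.getElem?_set]
  split_ifs with h1 h2 h3 h4 <;> simp_all <;> omega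

theorem pv_set_getD_self (l : List Int) (i : Nat) (h : i < l.length) :
    l.set i (l.getD i 0) = l := by
  apply List.ext_getElem?
  intro j
  rw [List.getElem?_set]
  rcases eq_or_ne i j with h1 | h1
  · subst h1
    rw [if_pos rfl, if_pos h, List.getD_eq_getElem l 0 h, List.getElem?_eq_getElem h]
  · rw [if_neg h1]

theorem pv_getD_map_range (f : Nat → Int) (n j : Nat) :
    ((List.range n).map f).getD j 0 = if j < n then f j else 0 := by
  simp only [List.getD_eq_getElem?_getD, List.getElem?_map, List.getElem?_range]
  by_cases h : j < n <;> simp [h]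

theorem pv_arr_len (r : List Int) (f : List Int → Nat → Int) (n m : Nat) :
    (pvArr r f n m).length = n := by simp [pvArr]

theorem pv_arr_set (r : List Int) (f : List Int → Nat → Int) (n m : Nat) (hm : m < n)
    (v : Int) (hv : v = f r m) :
    (pvArr r f n m).set m v = pvArr r f n (m + 1) := by
  subst hv
  apply List.ext_getElem
  · simp [pvArr]
  · intro j hj hj'
    simp only [pvArr, List.length_map, List.length_range] at hj'
    rcases eq_or_ne m j with h | h
    · subst h
      rw [List.getElem_set_self (by simp [pvArr]; omega)]
      simp [pvArr, hj']
    · rw [List.getElem_set_ne h]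
      simp only [pvArr, List.getElem_map, List.getElem_range]
      have : j < m ↔ j < m + 1 := by omega
      simp [this]

theorem pv_ite_mul (c : Prop) [Decidable c] (a : Int) :
    (if c then a else 0) = a * (if c then 1 else 0) := by split <;> ring

theorem pv_swap (n : Nat) (g : Nat → Nat → Int) :
    ∑ i ∈ Finset.range n, ∑ t ∈ Finset.range i, g i t
      = ∑ t ∈ Finset.range n, ∑ i ∈ Finset.Ico (t + 1) n, g i t := by
  induction n with
  | zero => simp
  | succ n ih =>
    rw [Finset.sum_range_succ, ih, Finset.sum_range_succ]
    have h1 : ∀ t ∈ Finset.range n,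
        ∑ i ∈ Finset.Ico (t + 1) (n + 1), g i t
          = (∑ i ∈ Finset.Ico (t + 1) n, g i t) + g n t := by
      intro t ht
      exact Finset.sum_Ico_succ_top (Nat.succ_le_of_lt (Finset.mem_range.mp ht)) _
    rw [Finset.sum_congr rfl h1, Finset.sum_add_distrib]
    simp

theorem pv_take_map (r : List Int) (j : Nat) (h : j ≤ r.length) :
    r.take j = (List.range j).map (fun t => r.getD t 0) := by
  apply List.ext_getElem
  · simp; omega
  · intro t ht ht'
    simp only [List.length_map, List.length_range] at ht'
    rw [List.getElem_take, List.getElem_map, List.getElem_range,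
      List.getD_eq_getElem r 0 (by omega)]

theorem pv_drop_map (r : List Int) (k : Nat) :
    r.drop k = (List.range (r.length - k)).map (fun t => r.getD (k + t) 0) := by
  apply List.ext_getElem
  · simp
  · intro t ht ht'
    simp only [List.length_map, List.length_range] at ht'
    rw [List.getElem_drop, List.getElem_map, List.getElem_range,
      List.getD_eq_getElem r 0 (by omega)]

theorem pv_filter_map_range_len (f : Nat → Int) (p : Int → Bool) (k : Nat) :
    ((((List.range k).map f).filter p).length : Int)
      = ∑ t ∈ Finset.range k, if p (f t) then 1 else 0 := by
  induction k with
  | zero => simp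
  | succ k ih =>
    rw [List.range_succ, List.map_append, List.filter_append, Finset.sum_range_succ, ← ih]
    cases h : p (f k) <;> simp [List.filter, h]

theorem pv_foldl_add2 (f g : Nat → Int) (a : Int) (k : Nat) :
    (List.range k).foldl (fun tot j => tot + f j + g j) a
      = a + ∑ j ∈ Finset.range k, (f j + g j) := by
  induction k generalizing a with
  | zero => simp
  | succ k ih =>
    rw [List.range_succ, List.foldl_append, ih, Finset.sum_range_succ]
    simp [List.foldl]
    ring

-- inner loop of A (outer index i fixed): one pass over range i
theorem pv_innerA (r : List Int) (i : Nat) (hi : i < r.length)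
    (idp ddp : List Int) (hL : idp.length = r.length) (hD : ddp.length = r.length)
    (iT dT : Int) (k : Nat) (hk : k ≤ i) :
    (List.range k).foldl (pvStepA r i) (idp, iT, ddp, dT) =
    (idp.set i (idp.getD i 0 + ∑ t ∈ Finset.range k, if pvRv r t < pvRv r i then 1 else 0),
     iT + ∑ t ∈ Finset.range k, if pvRv r t < pvRv r i then idp.getD t 0 else 0,
     ddp.set i (ddp.getD i 0 + ∑ t ∈ Finset.range k, if pvRv r i < pvRv r t then 1 else 0),
     dT + ∑ t ∈ Finset.range k, if pvRv r i < pvRv r t then ddp.getD t 0 else 0) := by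
  induction k with
  | zero =>
    simp only [List.range_zero, List.foldl_nil, Finset.range_zero, Finset.sum_empty, add_zero]
    rw [pv_set_getD_self idp i (by omega), pv_set_getD_self ddp i (by omega)]
  | succ k ih =>
    have hk' : k ≤ i := by omega
    have hik : ¬ (i = k) := by omega
    rw [List.range_succ, List.foldl_append, ih hk']
    simp only [List.foldl_cons, List.foldl_nil, pvStepA, pvRv]
    rw [Finset.sum_range_succ, Finset.sum_range_succ, Finset.sum_range_succ,
      Finset.sum_range_succ]
    have hiL : i < idp.length := by omega
    have hiD : i < ddp.length := by omega
    by_cases h1 : r.getD k 0 < r.getD i 0 <;> by_cases h2 : r.getD i 0 < r.getD k 0 <;>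
      simp only [h1, h2, if_true, if_false, ite_true, ite_false, pv_getD_set,
        List.set_set, hik, hiL, hiD, and_true, true_and, false_and, if_neg hik,
        List.length_set] <;>
      first
        | omega
        | (refine Prod.ext ?_ (Prod.ext ?_ (Prod.ext ?_ ?_)) <;>
            simp [pv_getD_set, hik, hiL, hiD, List.set_set] <;> ring)

-- outer loop of A after m iterations
theorem pv_outerA (r : List Int) (m : Nat) (hm : m ≤ r.length) :
    (List.range m).foldl (fun st i => (List.range i).foldl (pvStepA r i) st)
        (List.replicate r.length 0, 0, List.replicate r.length 0, 0) =
    (pvArr r pvCL r.length m,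
     ∑ i ∈ Finset.range m, ∑ t ∈ Finset.range i, if pvRv r t < pvRv r i then pvCL r t else 0,
     pvArr r pvCG r.length m,
     ∑ i ∈ Finset.range m, ∑ t ∈ Finset.range i, if pvRv r i < pvRv r t then pvCG r t else 0) := by
  induction m with
  | zero =>
    simp only [List.range_zero, List.foldl_nil, Finset.range_zero, Finset.sum_empty]
    refine Prod.ext ?_ (Prod.ext rfl (Prod.ext ?_ rfl)) <;>
      · apply List.ext_getElem <;> simp [pvArr]
  | succ m ih =>
    have hm' : m ≤ r.length := by omega
    have hmlt : m < r.length := by omega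
    rw [List.range_succ, List.foldl_append, ih hm']
    simp only [List.foldl_cons, List.foldl_nil]
    rw [pv_innerA r m hmlt _ _ (pv_arr_len r pvCL r.length m) (pv_arr_len r pvCG r.length m)
      _ _ m le_rfl]
    have hz1 : (pvArr r pvCL r.length m).getD m 0 = 0 := by
      simp [pvArr, pv_getD_map_range, hmlt]
    have hz2 : (pvArr r pvCG r.length m).getD m 0 = 0 := by
      simp [pvArr, pv_getD_map_range, hmlt]
    have hget1 : ∀ t ∈ Finset.range m,
        (if pvRv r t < pvRv r m then (pvArr r pvCL r.length m).getD t 0 else 0)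
          = (if pvRv r t < pvRv r m then pvCL r t else 0) := by
      intro t ht
      have htm := Finset.mem_range.mp ht
      simp [pvArr, pv_getD_map_range, htm, Nat.lt_of_lt_of_le htm hm']
    have hget2 : ∀ t ∈ Finset.range m,
        (if pvRv r m < pvRv r t then (pvArr r pvCG r.length m).getD t 0 else 0)
          = (if pvRv r m < pvRv r t then pvCG r t else 0) := by
      intro t ht
      have htm := Finset.mem_range.mp ht
      simp [pvArr, pv_getD_map_range, htm, Nat.lt_of_lt_of_le htm hm']
    rw [hz1, hz2, Finset.sum_congr rfl hget1, Finset.sum_congr rfl hget2]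
    rw [zero_add, zero_add,
      pv_arr_set r pvCL r.length m hmlt
        (∑ t ∈ Finset.range m, if pvRv r t < pvRv r m then 1 else 0) rfl,
      pv_arr_set r pvCG r.length m hmlt
        (∑ t ∈ Finset.range m, if pvRv r m < pvRv r t then 1 else 0) rfl]
    rw [Finset.sum_range_succ (fun i => ∑ t ∈ Finset.range i,
        if pvRv r t < pvRv r i then pvCL r t else 0) m,
      Finset.sum_range_succ (fun i => ∑ t ∈ Finset.range i,
        if pvRv r i < pvRv r t then pvCG r t else 0) m]

-- A's result in closed form
theorem pv_A_eq (r : List Int) :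
    numTeams r =
      (∑ i ∈ Finset.range r.length, ∑ t ∈ Finset.range i,
        if pvRv r t < pvRv r i then pvCL r t else 0)
      + ∑ i ∈ Finset.range r.length, ∑ t ∈ Finset.range i,
          if pvRv r i < pvRv r t then pvCG r t else 0 := by
  simp only [numTeams]
  rw [pv_outerA r r.length le_rfl]

-- B's summand in closed form, for j < length
theorem pv_B_terms (r : List Int) (j : Nat) (hj : j < r.length) :
    pvCountLt (r.take j) (r.getD j 0) = pvCL r j ∧
    pvCountGt (r.take j) (r.getD j 0) = pvCG r j ∧
    pvCountLt (r.drop (j + 1)) (r.getD j 0) = pvLR r r.length j ∧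
    pvCountGt (r.drop (j + 1)) (r.getD j 0) = pvGR r r.length j := by
  have ht := pv_take_map r j (by omega)
  have hd := pv_drop_map r (j + 1)
  refine ⟨?_, ?_, ?_, ?_⟩
  · rw [pvCountLt, ht, pv_filter_map_range_len]
    simp [pvCL, pvRv]
  · rw [pvCountGt, ht, pv_filter_map_range_len]
    simp [pvCG, pvRv]
  · rw [pvCountLt, hd, pv_filter_map_range_len, pvLR,
      Finset.sum_Ico_eq_sum_range]
    simp [pvRv]
  · rw [pvCountGt, hd, pv_filter_map_range_len, pvGR,
      Finset.sum_Ico_eq_sum_range]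
    simp [pvRv]

theorem pv_B_eq (r : List Int) :
    numTeams_alt r =
      ∑ j ∈ Finset.range r.length,
        (pvCL r j * pvGR r r.length j + pvCG r j * pvLR r r.length j) := by
  simp only [numTeams_alt]
  rw [pv_foldl_add2
    (fun j => pvCountLt (r.take j) (r.getD j 0) * pvCountGt (r.drop (j + 1)) (r.getD j 0))
    (fun j => pvCountGt (r.take j) (r.getD j 0) * pvCountLt (r.drop (j + 1)) (r.getD j 0)) 0
    r.length, zero_add]
  refine Finset.sum_congr rfl ?_
  intro j hj
  obtain ⟨e1, e2, e3, e4⟩ := pv_B_terms r j (Finset.mem_range.mp hj)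
  rw [e1, e2, e3, e4]

-- ===== VERDICT (by name: the statement is the Claim_ definition above) =====
theorem numTeams_spec : Claim_equal_numTeams := by
  intro r _
  unfold Spec_numTeams
  rw [pv_A_eq, pv_B_eq]
  rw [pv_swap r.length (fun i t => if pvRv r t < pvRv r i then pvCL r t else 0),
    pv_swap r.length (fun i t => if pvRv r i < pvRv r t then pvCG r t else 0)]
  rw [← Finset.sum_add_distrib]
  refine Finset.sum_congr rfl ?_
  intro t ht
  have h1 : ∑ i ∈ Finset.Ico (t + 1) r.length,
      (if pvRv r t < pvRv r i then pvCL r t else 0) = pvCL r t * pvGR r r.length t := by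
    rw [pvGR, Finset.mul_sum]
    exact Finset.sum_congr rfl (fun i _ => pv_ite_mul _ _)
  have h2 : ∑ i ∈ Finset.Ico (t + 1) r.length,
      (if pvRv r i < pvRv r t then pvCG r t else 0) = pvCG r t * pvLR r r.length t := by
    rw [pvLR, Finset.mul_sum]
    exact Finset.sum_congr rfl (fun i _ => pv_ite_mul _ _)
  rw [h1, h2]
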